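-- pv_equiv track=rewrite | github.com/Psy-Tabakowa/S2-OS-L-KonradKaranowski | Lab3/algorithms/lru.py | get_optimal
-- ===== SOURCE A (Python) =====
-- from typing import List
--
-- def get_optimal(recently_used_reversed: List[str], names: List[str]) -> str:
--     values = list()
--     for name in names:
--         i = 0
--         for rec in reversed(recently_used_reversed):
--             if rec == name:
--                 apd = (name, i)
--                 values.append(apd)
--                 break
--             i += 1
--     values.sort(key=lambda s: s[1])
--     return values[-1][0]
-- ===== SOURCE B (Python) =====
-- def get_optimal(recently_used_reversed, names):
--     # Distance-from-end of each entry, computed once: first index in the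
--     # reversed recency list wins (same "first match" rule as A's inner scan).
--     dist = {}
--     for i, rec in enumerate(reversed(recently_used_reversed)):
--         if rec not in dist:
--             dist[rec] = i
--     # Single argmax pass; >= makes later ties win, like stable sort + take last.
--     best_name, best_d = None, -1
--     for name in names:
--         d = dist.get(name, -1)
--         if 0 <= d and best_d <= d:
--             best_name, best_d = name, d
--     return best_name
-- ===== Notes on version B (the rewrite author's own statement) =====
-- stated objective: faster
-- what changed: B precomputes each entry's distance-from-end in one dict pass over the reversed recency list (removing A's inner scan per name) and replaces A's sort-then-take-last with a single running argmax whose >= update reproduces the stable-sort tie-break.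
import Mathlib
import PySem

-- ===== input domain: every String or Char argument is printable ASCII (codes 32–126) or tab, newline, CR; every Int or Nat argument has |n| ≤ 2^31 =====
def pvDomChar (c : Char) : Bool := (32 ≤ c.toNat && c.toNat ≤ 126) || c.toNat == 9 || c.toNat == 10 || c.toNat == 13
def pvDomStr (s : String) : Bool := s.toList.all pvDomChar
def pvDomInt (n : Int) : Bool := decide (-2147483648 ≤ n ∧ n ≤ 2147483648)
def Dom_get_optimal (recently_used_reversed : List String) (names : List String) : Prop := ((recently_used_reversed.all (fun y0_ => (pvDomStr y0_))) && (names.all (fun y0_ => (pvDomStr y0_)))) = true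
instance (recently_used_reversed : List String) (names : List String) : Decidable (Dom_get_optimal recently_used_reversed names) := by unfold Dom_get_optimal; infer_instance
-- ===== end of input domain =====

-- B replaces A's per-name inner scan + sort-then-take-last by a one-pass distance dict and a running argmax (faster; tie-break matched by >=).


-- ===== PORT A =====
-- inner loop of A: walk reversed(recently_used_reversed) with counter i, first match wins
def pvFindRec (name : String) : List String → Int → Option (String × Int)
  | [], _ => none
  | r :: rest, i => if r = name then some (name, i) else pvFindRec name rest (i + 1)

def get_optimal (recently_used_reversed : List String) (names : List String) : String :=
  let values := names.foldl (fun acc name =>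
    match pvFindRec name recently_used_reversed.reverse 0 with
    | some apd => acc ++ [apd]
    | none => acc) []
  let sortedValues := PySem.List.sorted values (fun s => s.2)
  match PySem.List.pyGet? sortedValues (-1) with
  | some p => p.1
  | none => ""   -- values[-1] raises IndexError in Python; excluded by Pre_

-- ===== PORT B =====
-- first loop of Source B: dict of first index per entry over reversed(recently_used_reversed)
def pvBuildDist : List String → Int → PySem.Dict String Int → PySem.Dict String Int
  | [], _, d => d
  | r :: rest, i, d => pvBuildDist rest (i + 1) (if (d.get? r).isSome then d else d.insert r i)

-- second loop of Source B: running argmax with >= tie-break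
def pvScan (dist : PySem.Dict String Int) : List String → Option String → Int → Option String × Int
  | [], bn, bd => (bn, bd)
  | name :: rest, bn, bd =>
    let d := dist.getD name (-1)
    if 0 ≤ d ∧ bd ≤ d then pvScan dist rest (some name) d else pvScan dist rest bn bd

def get_optimal_alt (recently_used_reversed : List String) (names : List String) : String :=
  let dist := pvBuildDist recently_used_reversed.reverse 0 ⟨[]⟩
  match (pvScan dist names none (-1)).1 with
  | some n => n
  | none => ""   -- python B returns None here (no name matched); excluded by Pre_

-- ===== PRECONDITION & SPEC =====
-- Pre_ excludes exactly the inputs on which no name occurs in the recency list: there A's values[-1] raises IndexError (and B returns None).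
def Pre_get_optimal (recently_used_reversed : List String) (names : List String) : Prop :=
  ∃ name ∈ names, name ∈ recently_used_reversed
instance (recently_used_reversed : List String) (names : List String) : Decidable (Pre_get_optimal recently_used_reversed names) := by unfold Pre_get_optimal; infer_instance
def pvWitness_get_optimal : List String × List String := (["a", "b"], ["b", "a", "c"])

def Spec_get_optimal (recently_used_reversed : List String) (names : List String) (out : String) : Prop := out = get_optimal_alt recently_used_reversed names
instance (recently_used_reversed : List String) (names : List String) (out : String) : Decidable (Spec_get_optimal recently_used_reversed names out) := by unfold Spec_get_optimal; infer_instance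

-- ===== CLAIM (what is proved, stated in full; the proofs are below) =====
def Claim_equal_get_optimal : Prop := ∀ (recently_used_reversed : List String) (names : List String), Dom_get_optimal recently_used_reversed names → Pre_get_optimal recently_used_reversed names → Spec_get_optimal recently_used_reversed names (get_optimal recently_used_reversed names)

-- ===== LEMMAS AND PROOFS =====

-- the shared abstract step: update an optional best pair by one candidate, later ties win
def pvUpd (b : Option (String × Int)) (p : String × Int) : Option (String × Int) :=
  match b with
  | none => some p
  | some q => if q.2 ≤ p.2 then some p else some q

def pvStep (rv : List String) (b : Option (String × Int)) (name : String) : Option (String × Int) :=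
  match pvFindRec name rv 0 with
  | some p => pvUpd b p
  | none => b

def pvAbs : Option (String × Int) → Option String × Int
  | none => (none, -1)
  | some q => (some q.1, q.2)

lemma pvGetLast?_cons_of_ne_nil {α : Type} {a : α} {l : List α} (h : l ≠ []) :
    (a :: l).getLast? = l.getLast? := by
  cases l with
  | nil => exact absurd rfl h
  | cons b t => simp [List.getLast?_cons]

lemma pvInsertBy_ne_nil {α : Type} (before : α → α → Bool) (x : α) (l : List α) :
    PySem.List.insertBy before x l ≠ [] := by
  cases l with
  | nil => simp [PySem.List.insertBy]
  | cons y ys => by_cases h : before x y <;> simp [PySem.List.insertBy, h]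

-- last element after stable insertion: x wins exactly when its key is ≥ the old last key
lemma pvInsertBy_getLast? (x : String × Int) (acc : List (String × Int))
    (h : acc.Pairwise (fun a b => a.2 ≤ b.2)) :
    (PySem.List.insertBy (fun a b => decide (a.2 < b.2)) x acc).getLast? =
      some (match acc.getLast? with
            | none => x
            | some l => if l.2 ≤ x.2 then x else l) := by
  induction acc with
  | nil => simp [PySem.List.insertBy]
  | cons y ys ih =>
    rcases List.pairwise_cons.mp h with ⟨hy, hys⟩
    by_cases hb : y.2 ≤ x.2
    · have : ¬ (x.2 < y.2) := by omega
      rw [show PySem.List.insertBy (fun a b => decide (a.2 < b.2)) x (y :: ys)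
            = y :: PySem.List.insertBy (fun a b => decide (a.2 < b.2)) x ys by
          simp [PySem.List.insertBy, this]]
      rw [pvGetLast?_cons_of_ne_nil (pvInsertBy_ne_nil _ x ys), ih hys]
      cases hys' : ys.getLast? with
      | none =>
        have : ys = [] := by cases ys <;> simp_all
        subst this; simp [hb]
      | some l =>
        have hne : ys ≠ [] := by rintro rfl; simp at hys'
        rw [pvGetLast?_cons_of_ne_nil hne, hys']
    · have hlt : x.2 < y.2 := by omega
      rw [show PySem.List.insertBy (fun a b => decide (a.2 < b.2)) x (y :: ys)
            = x :: y :: ys by simp [PySem.List.insertBy, hlt]]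
      rw [pvGetLast?_cons_of_ne_nil (by simp : (y :: ys) ≠ [])]
      cases hys' : ys.getLast? with
      | none =>
        have : ys = [] := by cases ys <;> simp_all
        subst this; simp; omega
      | some l =>
        have hne : ys ≠ [] := by rintro rfl; simp at hys'
        have hl : l ∈ ys := List.mem_of_getLast? hys'
        have hyl : y.2 ≤ l.2 := hy l hl
        rw [pvGetLast?_cons_of_ne_nil hne, hys']
        have : ¬ (l.2 ≤ x.2) := by omega
        simp [this]

-- last of the stable sort = running argmax with ≥ tie-break
lemma pvSorted_getLast? (vs : List (String × Int)) :
    (PySem.List.sorted vs (fun s => s.2)).getLast? = vs.foldl pvUpd none := by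
  induction vs using List.reverseRecOn with
  | nil => simp [PySem.List.sorted]
  | append_singleton vs x ih =>
    have hs : PySem.List.sorted (vs ++ [x]) (fun s => s.2)
        = PySem.List.insertBy (fun a b => decide (a.2 < b.2)) x (PySem.List.sorted vs (fun s => s.2)) := by
      simp [PySem.List.sorted, List.foldl_append]
    rw [hs, pvInsertBy_getLast? x _ (PySem.List.sorted_pairwise vs (fun s => s.2)), ih,
        List.foldl_append]
    cases hv : vs.foldl pvUpd none with
    | none => simp [pvUpd]
    | some q => by_cases h : q.2 ≤ x.2 <;> simp [pvUpd, List.foldl, h]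

lemma pvFindRec_ge (name : String) (l : List String) (i : Int) (p : String × Int)
    (h : pvFindRec name l i = some p) : i ≤ p.2 := by
  induction l generalizing i with
  | nil => simp [pvFindRec] at h
  | cons r rest ih =>
    by_cases hr : r = name
    · rw [show pvFindRec name (r :: rest) i
            = if r = name then some (name, i) else pvFindRec name rest (i + 1) from rfl,
          if_pos hr] at h
      cases h; simp
    · simp [pvFindRec, hr] at h
      have := ih (i + 1) h
      omega

lemma pvFindRec_fst (name : String) (l : List String) (i : Int) (p : String × Int)
    (h : pvFindRec name l i = some p) : p.1 = name := by
  induction l generalizing i with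
  | nil => simp [pvFindRec] at h
  | cons r rest ih =>
    by_cases hr : r = name
    · simp [pvFindRec, hr] at h; simp [← h]
    · simp [pvFindRec, hr] at h; exact ih (i + 1) h

-- the dict built by B stores exactly the first-match index of A's inner scan
lemma pvBuildDist_get? (l : List String) (i : Int) (d : PySem.Dict String Int) (name : String) :
    (pvBuildDist l i d).get? name =
      match d.get? name with
      | some v => some v
      | none => (pvFindRec name l i).map (·.2) := by
  induction l generalizing i d with
  | nil =>
    simp only [pvBuildDist]
    cases d.get? name <;> simp [pvFindRec]
  | cons r rest ih =>
    rw [show pvBuildDist (r :: rest) i d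
          = pvBuildDist rest (i + 1) (if (d.get? r).isSome then d else d.insert r i) from rfl, ih]
    by_cases hr : r = name
    · subst hr
      cases hd : d.get? r with
      | some v => simp [hd]
      | none => simp [pvFindRec, PySem.Dict.get?_insert_self]
    · cases hd : d.get? r with
      | some v =>
        simp only [Option.isSome_some, if_true]
        cases d.get? name <;> simp [pvFindRec, hr]
      | none =>
        simp only [Option.isSome_none, Bool.false_eq_true, if_false]
        rw [PySem.Dict.get?_insert_of_ne d i (Ne.symm hr)]
        cases d.get? name <;> simp [pvFindRec, hr]

-- B's scan computes the abstraction of the shared foldl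
lemma pvScan_eq (rv : List String) (names : List String) (b : Option (String × Int))
    (hb : ∀ q, b = some q → 0 ≤ q.2) :
    pvScan (pvBuildDist rv 0 ⟨[]⟩) names (pvAbs b).1 (pvAbs b).2
      = pvAbs (names.foldl (pvStep rv) b) := by
  induction names generalizing b with
  | nil => cases b <;> simp [pvScan, pvAbs]
  | cons name rest ih =>
    have hget : (pvBuildDist rv 0 ⟨[]⟩).getD name (-1)
        = match pvFindRec name rv 0 with
          | some p => p.2
          | none => -1 := by
      rw [PySem.Dict.getD, pvBuildDist_get?]
      simp only [PySem.Dict.get?]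
      cases pvFindRec name rv 0 <;> simp
    have hstep : List.foldl (pvStep rv) b (name :: rest)
        = List.foldl (pvStep rv) (pvStep rv b name) rest := rfl
    rw [hstep]
    cases hf : pvFindRec name rv 0 with
    | none =>
      have hd : (pvBuildDist rv 0 ⟨[]⟩).getD name (-1) = -1 := by rw [hget, hf]
      have hcond : ¬ (0 ≤ (-1 : Int) ∧ (pvAbs b).2 ≤ -1) := by omega
      rw [show pvScan (pvBuildDist rv 0 ⟨[]⟩) (name :: rest) (pvAbs b).1 (pvAbs b).2
            = pvScan (pvBuildDist rv 0 ⟨[]⟩) rest (pvAbs b).1 (pvAbs b).2 by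
          simp only [pvScan]; rw [hd, if_neg hcond]]
      rw [show pvStep rv b name = b by simp [pvStep, hf]]
      exact ih b hb
    | some p =>
      have hp : 0 ≤ p.2 := pvFindRec_ge name rv 0 p hf
      have hd : (pvBuildDist rv 0 ⟨[]⟩).getD name (-1) = p.2 := by rw [hget, hf]
      have hname : p.1 = name := pvFindRec_fst name rv 0 p hf
      cases b with
      | none =>
        have hcond : (0 ≤ p.2 ∧ (pvAbs (none : Option (String × Int))).2 ≤ p.2) := by
          simp [pvAbs]; omega
        rw [show pvScan (pvBuildDist rv 0 ⟨[]⟩) (name :: rest) (pvAbs (none : Option (String × Int))).1 (pvAbs (none : Option (String × Int))).2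
              = pvScan (pvBuildDist rv 0 ⟨[]⟩) rest (some name) p.2 by
            simp only [pvScan]; rw [hd, if_pos hcond]]
        rw [show pvStep rv none name = some p by simp [pvStep, hf, pvUpd]]
        have := ih (some p) (by intro q hq; cases hq; exact hp)
        simpa [pvAbs, hname] using this
      | some q =>
        have hq : 0 ≤ q.2 := hb q rfl
        by_cases hle : q.2 ≤ p.2
        · have hcond : (0 ≤ p.2 ∧ (pvAbs (some q)).2 ≤ p.2) := by simp [pvAbs]; omega
          rw [show pvScan (pvBuildDist rv 0 ⟨[]⟩) (name :: rest) (pvAbs (some q)).1 (pvAbs (some q)).2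
                = pvScan (pvBuildDist rv 0 ⟨[]⟩) rest (some name) p.2 by
              simp only [pvScan]; rw [hd, if_pos hcond]]
          rw [show pvStep rv (some q) name = some p by simp [pvStep, hf, pvUpd, hle]]
          have := ih (some p) (by intro q' hq'; cases hq'; exact hp)
          simpa [pvAbs, hname] using this
        · have hcond : ¬ (0 ≤ p.2 ∧ (pvAbs (some q)).2 ≤ p.2) := by simp [pvAbs]; omega
          rw [show pvScan (pvBuildDist rv 0 ⟨[]⟩) (name :: rest) (pvAbs (some q)).1 (pvAbs (some q)).2
                = pvScan (pvBuildDist rv 0 ⟨[]⟩) rest (pvAbs (some q)).1 (pvAbs (some q)).2 by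
              simp only [pvScan]; rw [hd, if_neg hcond]]
          rw [show pvStep rv (some q) name = some q by simp [pvStep, hf, pvUpd, hle]]
          exact ih (some q) hb

-- A's argmax over its values list = the shared foldl over names
lemma pvValues_argmax (rv : List String) (names : List String) (acc : List (String × Int))
    (b : Option (String × Int)) (hacc : acc.foldl pvUpd none = b) :
    (names.foldl (fun acc name =>
        match pvFindRec name rv 0 with
        | some apd => acc ++ [apd]
        | none => acc) acc).foldl pvUpd none
      = names.foldl (pvStep rv) b := by
  induction names generalizing acc b with
  | nil => simpa using hacc
  | cons name rest ih =>
    cases hf : pvFindRec name rv 0 with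
    | none =>
      simp only [List.foldl, hf, pvStep]
      exact ih acc b hacc
    | some p =>
      simp only [List.foldl, hf, pvStep]
      exact ih (acc ++ [p]) (pvUpd b p) (by rw [List.foldl_append, hacc]; rfl)

-- ===== VERDICT (by name: the statement is the Claim_ definition above) =====
theorem get_optimal_spec : Claim_equal_get_optimal := by
  intro r names _ _
  unfold Spec_get_optimal
  simp only [get_optimal, get_optimal_alt]
  rw [PySem.List.pyGet?_neg_one, pvSorted_getLast?,
      pvValues_argmax r.reverse names [] none rfl]
  have := pvScan_eq r.reverse names none (by intro q h; cases h)
  simp only [pvAbs] at this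
  rw [this]
  cases names.foldl (pvStep r.reverse) none
  · simp
  · rfl
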